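-- pv_equiv track=rewrite | github.com/ivshinmike/proj-zerocode | PDF_generator/main.py | detect_invoice_column
-- ===== SOURCE A (Python) =====
-- from typing import List, Dict, Any, Optional
--
-- def detect_invoice_column(records: List[Dict[str, Any]]) -> Optional[str]:
--     """
--     Попробовать угадать колонку с invoice id.
--     """
--     if not records:
--         return None
--
--     candidate_keys = [
--         "invoice_id",
--         "invoiceId",
--         "invoice",
--         "invoice_no",
--         "invoice_number",
--         "id",
--     ]
--
--     keys = set().union(*(r.keys() for r in records))
--     for key in candidate_keys:
--         if key in keys:
--             return key
--     return None
-- ===== SOURCE B (Python) =====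
-- from typing import List, Dict, Any, Optional
--
-- def detect_invoice_column(records: List[Dict[str, Any]]) -> Optional[str]:
--     candidate_keys = [
--         "invoice_id",
--         "invoiceId",
--         "invoice",
--         "invoice_no",
--         "invoice_number",
--         "id",
--     ]
--     # single pass over the data: keep the best (lowest) priority rank seen so far
--     rank = {c: i for i, c in enumerate(candidate_keys)}
--     best = None
--     for r in records:
--         for k in r:
--             i = rank.get(k)
--             if i is not None and (best is None or i < best):
--                 best = i
--     return None if best is None else candidate_keys[best]
-- ===== Notes on version B (the rewrite author's own statement) =====
-- stated objective: alternative
-- what changed: B replaces A's candidate-priority search against a precomputed union-of-all-keys set by a single min-reduction pass over the records: a rank dict maps each candidate to its priority and one loop over all record keys keeps the lowest rank seen, returning that candidate at the end.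
import Mathlib
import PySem

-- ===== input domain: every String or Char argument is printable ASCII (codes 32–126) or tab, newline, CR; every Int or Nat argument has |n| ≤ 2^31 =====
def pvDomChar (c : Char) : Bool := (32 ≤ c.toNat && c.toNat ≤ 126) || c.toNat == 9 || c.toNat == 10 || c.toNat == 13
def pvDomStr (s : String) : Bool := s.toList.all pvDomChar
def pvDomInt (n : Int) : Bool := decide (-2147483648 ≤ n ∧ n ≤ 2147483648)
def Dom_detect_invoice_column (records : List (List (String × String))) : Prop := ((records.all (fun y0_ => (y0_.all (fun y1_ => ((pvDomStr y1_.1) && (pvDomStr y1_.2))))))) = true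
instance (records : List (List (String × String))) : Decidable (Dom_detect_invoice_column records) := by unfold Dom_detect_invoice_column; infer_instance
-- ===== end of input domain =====

-- B replaces A's candidate-priority search against a precomputed key-union set by a single
-- min-rank reduction pass over the record keys; objective: alternative, same result.

-- ===== PORT A =====
def pvCandidates : List String :=
  ["invoice_id", "invoiceId", "invoice", "invoice_no", "invoice_number", "id"]

-- A's 'for key in candidate_keys: if key in keys: return key' loop
def pvALoop (keys : PySem.Set String) : List String → Option String
  | [] => none
  | k :: ks => if PySem.Set.contains keys k then some k else pvALoop keys ks

def detect_invoice_column (records : List (List (String × String))) : Option String :=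
  if records = [] then none
  else
    -- keys = set().union(*(r.keys() for r in records))
    let keys : PySem.Set String :=
      records.foldl (fun s r => PySem.Set.update s (r.map Prod.fst)) PySem.Set.empty
    pvALoop keys pvCandidates

-- ===== PORT B =====
def pvCandidatesB : List String :=
  ["invoice_id", "invoiceId", "invoice", "invoice_no", "invoice_number", "id"]

-- B's inner-loop body: 'i = rank.get(k); if i is not None and (best is None or i < best): best = i'
def pvBStep (rank : PySem.Dict String Int) (best : Option Int) (k : String) : Option Int :=
  match PySem.Dict.get? rank k with
  | none => best
  | some i =>
      match best with
      | none => some i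
      | some b => if i < b then some i else some b

def detect_invoice_column_alt (records : List (List (String × String))) : Option String :=
  -- rank = {c: i for i, c in enumerate(candidate_keys)}
  let rank : PySem.Dict String Int :=
    (PySem.List.enumerate pvCandidatesB 0).foldl (fun d p => d.insert p.2 p.1) PySem.Dict.empty
  -- for r in records: for k in r: …
  let best : Option Int :=
    records.foldl (fun best r => r.foldl (fun best kv => pvBStep rank best kv.1) best) none
  -- return None if best is None else candidate_keys[best]
  match best with
  | none => none
  | some b => PySem.List.pyGet? pvCandidatesB b

-- ===== PRECONDITION & SPEC =====
def Spec_detect_invoice_column (records : List (List (String × String))) (out : Option String) : Prop := out = detect_invoice_column_alt records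
instance (records : List (List (String × String))) (out : Option String) : Decidable (Spec_detect_invoice_column records out) := by unfold Spec_detect_invoice_column; infer_instance

-- ===== CLAIM (what is proved, stated in full; the proofs are below) =====
def Claim_equal_detect_invoice_column : Prop := ∀ (records : List (List (String × String))), Dom_detect_invoice_column records → Spec_detect_invoice_column records (detect_invoice_column records)

-- ===== LEMMAS AND PROOFS =====

-- option-min (left-biased), the accumulator update of B's loop
def pvOmin (b o : Option Int) : Option Int :=
  match o with
  | none => b
  | some i =>
      match b with
      | none => some i
      | some b' => if i < b' then some i else some b'

theorem pvOmin_none_left (o : Option Int) : pvOmin none o = o := by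
  cases o <;> rfl

theorem pvOmin_some_some (x y : Int) : pvOmin (some x) (some y) = some (min x y) := by
  simp only [pvOmin]
  split_ifs <;> simp only [Option.some.injEq] <;> omega

theorem pvOmin_none_right (b : Option Int) : pvOmin b none = b := rfl

theorem pvOmin_assoc (a b c : Option Int) :
    pvOmin (pvOmin a b) c = pvOmin a (pvOmin b c) := by
  cases a <;> cases b <;> cases c <;>
    simp only [pvOmin_none_left, pvOmin_none_right, pvOmin_some_some, min_assoc]

-- running min of LU over a key list
def pvM (LU : String → Option Int) (keys : List String) : Option Int :=
  keys.foldl (fun b k => pvOmin b (LU k)) none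

theorem pv_fold_factor (LU : String → Option Int) (keys : List String) (acc : Option Int) :
    keys.foldl (fun b k => pvOmin b (LU k)) acc = pvOmin acc (pvM LU keys) := by
  induction keys generalizing acc with
  | nil => rfl
  | cons k ks ih =>
      have h1 : pvM LU (k :: ks) = pvOmin (LU k) (pvM LU ks) := by
        rw [pvM, List.foldl_cons, ih, pvOmin_none_left]
      rw [List.foldl_cons, ih, h1, pvOmin_assoc]

theorem pvM_cons (LU : String → Option Int) (k : String) (ks : List String) :
    pvM LU (k :: ks) = pvOmin (LU k) (pvM LU ks) := by
  rw [pvM, List.foldl_cons, pv_fold_factor, pvOmin_none_left]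

theorem pvM_congr (LU LU' : String → Option Int) (keys : List String)
    (h : ∀ k ∈ keys, LU k = LU' k) : pvM LU keys = pvM LU' keys := by
  induction keys with
  | nil => rfl
  | cons k ks ih =>
      rw [pvM_cons, pvM_cons, h k (List.mem_cons_self),
        ih (fun k hk => h k (List.mem_cons_of_mem _ hk))]

theorem pvM_ge (LU : String → Option Int) (n : Int)
    (hlb : ∀ k j, LU k = some j → n ≤ j) :
    ∀ keys b, pvM LU keys = some b → n ≤ b := by
  intro keys
  induction keys with
  | nil => intro b h; simp [pvM] at h
  | cons k ks ih =>
      intro b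
      rw [pvM_cons]
      rcases hk : LU k with _ | i <;> rcases hm : pvM LU ks with _ | m <;>
        intro h <;> simp only [pvOmin] at h
      · exact absurd h (by simp)
      · obtain rfl := Option.some.inj h; exact ih _ hm
      · obtain rfl := Option.some.inj h; exact hlb k _ hk
      · split_ifs at h with hlt
        · obtain rfl := Option.some.inj h; exact ih _ hm
        · obtain rfl := Option.some.inj h; exact hlb k _ hk

theorem pvM_min (LU : String → Option Int) (n : Int) (c : String)
    (hlb : ∀ k j, LU k = some j → n ≤ j) (hc : LU c = some n) :
    ∀ keys, c ∈ keys → pvM LU keys = some n := by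
  intro keys
  induction keys with
  | nil => intro h; simp at h
  | cons k ks ih =>
      intro h
      rw [pvM_cons]
      rcases List.mem_cons.mp h with h | h
      · rw [h] at hc
        rw [hc]
        rcases hm : pvM LU ks with _ | m
        · rfl
        · have hge := pvM_ge LU n hlb ks m hm
          simp only [pvOmin]
          split_ifs with hlt
          · exact absurd hlt (by omega)
          · rfl
      · rw [ih h]
        rcases hk : LU k with _ | i
        · rfl
        · have hge := hlb k i hk
          simp only [pvOmin]
          split_ifs with hlt
          · rfl
          · simp only [Option.some.injEq]; omega

-- the rank assoc list for a candidate suffix starting at priority n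
def pvAssoc : List String → Int → List (String × Int)
  | [], _ => []
  | c :: cs, n => (c, n) :: pvAssoc cs (n + 1)

def pvLU (as : List (String × Int)) (k : String) : Option Int :=
  PySem.Dict.get? (PySem.Dict.mk as) k

theorem pvLU_ge (cs : List String) :
    ∀ (n : Int) (k : String) (j : Int), pvLU (pvAssoc cs n) k = some j → n ≤ j := by
  induction cs with
  | nil => intro n k j h; exact absurd h (by simp [pvLU, pvAssoc, PySem.Dict.get?])
  | cons c cs ih =>
      intro n k j h
      rw [show pvAssoc (c :: cs) n = (c, n) :: pvAssoc cs (n + 1) from rfl, pvLU,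
        PySem.Dict.get?_mk_cons] at h
      split_ifs at h with hck
      · have := Option.some.inj h; omega
      · exact le_trans (by omega) (ih (n + 1) k j h)

-- main bridge: B's min-rank over any key list = A's first-match over the candidates
theorem pv_main (cs : List String) (n : Int) (keys : List String) :
    (match pvM (pvLU (pvAssoc cs n)) keys with
     | none => none
     | some b => PySem.List.pyGet? cs (b - n))
    = cs.find? (fun c => keys.any (fun k => k == c)) := by
  induction cs generalizing n with
  | nil =>
      have hnone : pvM (pvLU (pvAssoc [] n)) keys = none := by
        rw [pvM_congr (pvLU (pvAssoc [] n)) (fun _ => none) keys (fun k _ => rfl)]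
        induction keys with
        | nil => rfl
        | cons k ks ih => rw [pvM_cons, ih]; rfl
      rw [hnone]
      rfl
  | cons c cs ih =>
      rcases hc : keys.any (fun k => k == c) with _ | _
      · -- c absent: the head entry of the rank list is never consulted
        have hcong : pvM (pvLU (pvAssoc (c :: cs) n)) keys
            = pvM (pvLU (pvAssoc cs (n + 1))) keys := by
          apply pvM_congr
          intro k hk
          have hne : (c == k) = false := by
            rcases hck : c == k with _ | _
            · rfl
            · exfalso
              have : keys.any (fun k => k == c) = true := by
                simp only [List.any_eq_true, beq_iff_eq]
                exact ⟨k, hk, (eq_of_beq hck).symm⟩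
              rw [this] at hc; exact Bool.noConfusion hc
          rw [show pvAssoc (c :: cs) n = (c, n) :: pvAssoc cs (n + 1) from rfl, pvLU,
            PySem.Dict.get?_mk_cons, hne]
          rfl
        rw [hcong, List.find?_cons_of_neg (p := fun c => keys.any (fun k => k == c)) (by simp [hc]), ← ih (n + 1)]
        rcases hm : pvM (pvLU (pvAssoc cs (n + 1))) keys with _ | b
        · rfl
        · have hb : n + 1 ≤ b := pvM_ge _ (n + 1) (pvLU_ge cs (n + 1)) keys b hm
          obtain ⟨m, hm1⟩ : ∃ m : Nat, b - n = (m : Int) := ⟨(b - n).toNat, by omega⟩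
          obtain ⟨m', hm2⟩ : ∃ m' : Nat, b - (n + 1) = (m' : Int) := ⟨(b - (n + 1)).toNat, by omega⟩
          have h3 : m = m' + 1 := by omega
          show PySem.List.pyGet? (c :: cs) (b - n) = PySem.List.pyGet? cs (b - (n + 1))
          rw [hm1, hm2, PySem.List.pyGet?_natCast, PySem.List.pyGet?_natCast, h3]
          rfl
      · -- c is present: A finds c first, B's min rank is n
        have hcmem : c ∈ keys := by
          simp only [List.any_eq_true, beq_iff_eq] at hc
          obtain ⟨k, hk, rfl⟩ := hc; exact hk
        have hlu : pvLU (pvAssoc (c :: cs) n) c = some n := by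
          rw [show pvAssoc (c :: cs) n = (c, n) :: pvAssoc cs (n + 1) from rfl, pvLU,
            PySem.Dict.get?_mk_cons]
          simp
        have hlb : ∀ k j, pvLU (pvAssoc (c :: cs) n) k = some j → n ≤ j := by
          intro k j h
          rw [show pvAssoc (c :: cs) n = (c, n) :: pvAssoc cs (n + 1) from rfl, pvLU,
            PySem.Dict.get?_mk_cons] at h
          split_ifs at h with hck
          · have := Option.some.inj h; omega
          · exact le_trans (by omega) (pvLU_ge cs (n + 1) k j h)
        rw [pvM_min _ n c hlb hlu keys hcmem,
          List.find?_cons_of_pos (p := fun c => keys.any (fun k => k == c)) hc]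
        have h0 : n - n = ((0 : Nat) : Int) := by omega
        rw [show (match (some n : Option Int) with
             | none => none
             | some b => PySem.List.pyGet? (c :: cs) (b - n)) = PySem.List.pyGet? (c :: cs) (n - n) from rfl,
          h0, PySem.List.pyGet?_natCast]
        rfl

-- A's candidate loop is a find?
theorem pvALoop_eq_find? (s : PySem.Set String) (cs : List String) :
    pvALoop s cs = cs.find? (fun c => PySem.Set.contains s c) := by
  induction cs with
  | nil => rfl
  | cons c cs ih =>
      rw [pvALoop, ih]
      rcases hcc : PySem.Set.contains s c with _ | _
      · rw [if_neg (by simp), List.find?_cons_of_neg (by rw [hcc]; simp)]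
      · rw [if_pos rfl, List.find?_cons_of_pos hcc]

-- membership in A's accumulated key set = some record carries the key
theorem pv_mem_fold_keys (records : List (List (String × String)))
    (s : PySem.Set String) (k : String) :
    (k ∈ records.foldl (fun s r => PySem.Set.update s (r.map Prod.fst)) s) ↔
      (k ∈ s ∨ ∃ r ∈ records, ∃ kv ∈ r, kv.1 = k) := by
  induction records generalizing s with
  | nil => simp
  | cons r rs ih =>
      simp only [List.foldl_cons, ih, PySem.Set.mem_update, List.mem_cons, List.mem_map]
      constructor
      · rintro ((h | ⟨kv, hkv, hk⟩) | ⟨r', hr', hkv⟩)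
        · exact Or.inl h
        · exact Or.inr ⟨r, Or.inl rfl, kv, hkv, hk⟩
        · exact Or.inr ⟨r', Or.inr hr', hkv⟩
      · rintro (h | ⟨r', hr' | hr', kv, hkv, hk⟩)
        · exact Or.inl (Or.inl h)
        · exact Or.inl (Or.inr ⟨kv, hr' ▸ hkv, hk⟩)
        · exact Or.inr ⟨r', hr', kv, hkv, hk⟩

theorem pv_contains_eq_any (records : List (List (String × String))) (k : String) :
    PySem.Set.contains
      (records.foldl (fun s r => PySem.Set.update s (r.map Prod.fst)) PySem.Set.empty) k
      = records.any (fun r => r.any (fun kv => kv.1 == k)) := by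
  rcases h : records.any (fun r => r.any (fun kv => kv.1 == k)) with _ | _
  · rw [Bool.eq_false_iff]
    intro hc
    have := (PySem.Set.contains_iff _ _).mp hc
    rw [pv_mem_fold_keys] at this
    rcases this with h' | ⟨r, hr, kv, hkv, hk⟩
    · simp [PySem.Set.empty] at h'
    · have : records.any (fun r => r.any (fun kv => kv.1 == k)) = true := by
        simp only [List.any_eq_true]
        exact ⟨r, hr, kv, hkv, by simp [hk]⟩
      simp [this] at h
  · apply (PySem.Set.contains_iff _ _).mpr
    rw [pv_mem_fold_keys]
    simp only [List.any_eq_true] at h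
    obtain ⟨r, hr, kv, hkv, hk⟩ := h
    exact Or.inr ⟨r, hr, kv, hkv, by simpa using hk⟩

-- B's nested fold = the min-rank fold over the flattened key list
theorem pv_nested_fold (rank : PySem.Dict String Int) (records : List (List (String × String))) :
    records.foldl (fun best r => r.foldl (fun best kv => pvBStep rank best kv.1) best) none
      = pvM (fun k => PySem.Dict.get? rank k) (records.flatMap (fun r => r.map Prod.fst)) := by
  rw [pvM]
  induction records using List.reverseRecOn with
  | nil => rfl
  | append_singleton rs r ih =>
      rw [List.foldl_append, List.flatMap_append, List.foldl_append, ih]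
      simp only [List.foldl_cons, List.foldl_nil, List.flatMap_cons, List.flatMap_nil,
        List.append_nil, List.foldl_map]
      rfl

-- B's rank dict is exactly the assoc list of candidates with their priorities
theorem pv_rank_eq :
    ((PySem.List.enumerate pvCandidatesB 0).foldl (fun d p => d.insert p.2 p.1) PySem.Dict.empty)
      = PySem.Dict.mk (pvAssoc pvCandidatesB 0) := by decide

-- the per-candidate presence test over the flat key list = the nested any over records
theorem pv_present_flat (records : List (List (String × String))) (c : String) :
    (records.flatMap (fun r => r.map Prod.fst)).any (fun k => k == c)
      = records.any (fun r => r.any (fun kv => kv.1 == c)) := by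
  simp only [List.any_flatMap, List.any_map]
  rfl

-- ===== VERDICT (by name: the statement is the Claim_ definition above) =====
theorem detect_invoice_column_spec : Claim_equal_detect_invoice_column := by
  intro records _
  unfold Spec_detect_invoice_column
  by_cases h : records = []
  · subst h; rfl
  · have halt : detect_invoice_column_alt records
        = (match pvM (pvLU (pvAssoc pvCandidatesB 0)) (records.flatMap (fun r => r.map Prod.fst)) with
           | none => none
           | some b => PySem.List.pyGet? pvCandidatesB b) := by
      simp only [detect_invoice_column_alt]
      rw [pv_rank_eq, pv_nested_fold]
      rfl
    have hmain := pv_main pvCandidatesB 0 (records.flatMap (fun r => r.map Prod.fst))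
    simp only [Int.sub_zero] at hmain
    rw [halt, hmain]
    unfold detect_invoice_column
    simp only [h, if_false]
    rw [pvALoop_eq_find?]
    have hpred : (fun c => PySem.Set.contains
        (records.foldl (fun s r => PySem.Set.update s (r.map Prod.fst)) PySem.Set.empty) c)
        = (fun c => (records.flatMap (fun r => r.map Prod.fst)).any (fun k => k == c)) := by
      funext c
      rw [pv_contains_eq_any, pv_present_flat]
    rw [hpred]
    rfl
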